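-- pv_equiv track=rewrite | github.com/AdityaPatil-AP/LeetCode-Questions-TopicWise | Leet_Code_Solutions/demo.py | helper
-- ===== SOURCE A (Python) =====
-- from collections import Counter
--
-- def get_words_from_string(text):
--     words = text.split()
--     return words
--
-- def helper(text, k):
--     words = get_words_from_string(text)
--     word_counts = Counter(words)
--     ans = []
--     for word in words:
--         if word_counts[word] >= k:
--             ans.append(word)
--             word_counts[word] = 0
--     return ans
-- ===== SOURCE B (Python) =====
-- def helper(text, k):
--     words = text.split()
--     first = {}
--     for i, w in enumerate(words):
--         if w not in first:
--             first[w] = i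
--     sw = sorted(words)
--     qual = []
--     i = 0
--     n = len(sw)
--     while i < n:
--         j = i
--         while j < n and sw[j] == sw[i]:
--             j += 1
--         if j - i >= k:
--             qual.append(sw[i])
--         i = j
--     return sorted(qual, key=lambda w: first[w])
-- ===== Notes on version B (the rewrite author's own statement) =====
-- stated objective: alternative
-- what changed: B drops the Counter entirely: it sorts the words and measures run lengths in the sorted list to find qualifying words, records each word's first index in one enumerate pass, and restores first-occurrence order with a final key-sort, instead of A's hash-count pass followed by an emission pass that dedups by zeroing the counter.
-- intended difference: For k <= 0 on a text with a repeated word, A's zeroed sentinel still satisfies count >= k so A returns every occurrence with duplicates, while B returns each qualifying word once in first-occurrence order, which is the intended deduplicated result. — e.g. on helper("a b a", 0): A returns ["a", "b", "a"], B returns ["a", "b"]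
import Mathlib
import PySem

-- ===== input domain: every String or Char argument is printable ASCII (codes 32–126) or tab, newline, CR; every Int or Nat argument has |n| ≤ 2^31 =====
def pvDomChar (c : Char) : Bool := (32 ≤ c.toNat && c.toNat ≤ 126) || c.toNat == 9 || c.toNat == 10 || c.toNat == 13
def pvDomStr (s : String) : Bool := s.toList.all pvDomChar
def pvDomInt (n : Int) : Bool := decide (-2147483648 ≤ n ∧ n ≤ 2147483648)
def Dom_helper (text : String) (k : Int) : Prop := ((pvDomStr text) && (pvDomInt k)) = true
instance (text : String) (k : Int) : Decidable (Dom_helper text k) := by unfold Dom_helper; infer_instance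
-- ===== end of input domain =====

-- B replaces A's Counter-plus-zeroing-emission pass with a sorting-based algorithm: sort the words,
-- read off run lengths to find the qualifying words, and restore first-occurrence order with a
-- key-sort on a first-index map; for k <= 0 with repeated words B dedups where A does not.


-- ===== PORT A =====
def helper (text : String) (k : Int) : List String :=
  let words := PySem.Str.split₀ text
  let wordCounts := PySem.Dict.counter words
  let res := words.foldl
    (fun (s : List String × PySem.Dict String Int) word =>
      if k ≤ s.2.getD word 0 then (s.1 ++ [word], s.2.insert word 0) else s)
    ([], wordCounts)
  res.1

-- ===== PORT B =====
-- inner 'while j < n and sw[j] == sw[i]: j += 1' (fuel = n - j steps remain; called with fuel = n, always enough)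
def runFrom (sw : List String) (v : String) : Nat → Nat → Nat
  | 0, j => j
  | fuel + 1, j =>
      if h : j < sw.length then
        if sw[j] = v then runFrom sw v fuel (j + 1) else j
      else j

-- outer 'while i < n: …' of Source B, building qual front-to-back (fuel = n - i steps remain)
def runScan (sw : List String) (k : Int) : Nat → Nat → List String
  | 0, _ => []
  | fuel + 1, i =>
      if h : i < sw.length then
        let j := runFrom sw sw[i] sw.length i
        if k ≤ (j : Int) - (i : Int) then sw[i] :: runScan sw k fuel j else runScan sw k fuel j
      else []

def helper_alt (text : String) (k : Int) : List String :=
  let words := PySem.Str.split₀ text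
  let first := (PySem.List.enumerate words 0).foldl
    (fun (d : PySem.Dict String Int) p => if d.contains p.2 then d else d.insert p.2 p.1)
    PySem.Dict.empty
  let sw := PySem.List.sorted words (fun w => w) false
  let qual := runScan sw k sw.length 0
  -- Python's 'lambda w: first[w]' never misses (every qual word is a word); getD 0 is that total lookup
  PySem.List.sorted qual (fun w => first.getD w 0) false

-- ===== PRECONDITION & SPEC =====
-- For k <= 0 on a text with a repeated word, A's zeroed sentinel still satisfies count >= k, so A
-- returns every occurrence with duplicates, while B returns each qualifying word once in
-- first-occurrence order, which is the intended deduplicated result.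
def D_helper (text : String) (k : Int) : Prop :=
  k ≤ 0 ∧ ¬ (PySem.Str.split₀ text).Nodup
instance (text : String) (k : Int) : Decidable (D_helper text k) := by unfold D_helper; infer_instance

def Spec_helper (text : String) (k : Int) (out : List String) : Prop :=
  ¬ D_helper text k → out = helper_alt text k
instance (text : String) (k : Int) (out : List String) : Decidable (Spec_helper text k out) := by unfold Spec_helper; infer_instance

def pvDiffWitness_helper : String × Int := ("a b a", 0)
def pvDiffWitnessOut_helper : (List String) × (List String) := (["a", "b", "a"], ["a", "b"])

-- ===== CLAIM (what is proved, stated in full; the proofs are below) =====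
def Claim_unchanged_helper : Prop := ∀ (text : String) (k : Int), Dom_helper text k → Spec_helper text k (helper text k)
def Claim_changed_helper : Prop := Dom_helper (pvDiffWitness_helper.1) (pvDiffWitness_helper.2) ∧ D_helper (pvDiffWitness_helper.1) (pvDiffWitness_helper.2) ∧ helper (pvDiffWitness_helper.1) (pvDiffWitness_helper.2) = pvDiffWitnessOut_helper.1 ∧ helper_alt (pvDiffWitness_helper.1) (pvDiffWitness_helper.2) = pvDiffWitnessOut_helper.2 ∧ pvDiffWitnessOut_helper.1 ≠ pvDiffWitnessOut_helper.2
def Claim_exact_helper : Prop := ∀ (text : String) (k : Int), Dom_helper text k → D_helper text k → helper text k ≠ helper_alt text k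

-- ===== LEMMAS AND PROOFS =====

-- ---- A-side: characterisation of A's emission loop ----

-- A's loop when k ≥ 1: a word is emitted exactly at its first occurrence, and only if its total
-- count is ≥ k; the invariant tracks the processed prefix p.
theorem helperA_loop_pos (k : Int) (hk : 1 ≤ k) (words : List String) :
    ∀ (l p : List String) (d : PySem.Dict String Int),
      words = p ++ l →
      (∀ w, d.getD w 0 = if w ∈ p ∧ k ≤ (words.count w : Int) then 0 else (words.count w : Int)) →
      (l.foldl
        (fun (s : List String × PySem.Dict String Int) word =>
          if k ≤ s.2.getD word 0 then (s.1 ++ [word], s.2.insert word 0) else s)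
        ((PySem.List.dedup p).filter (fun w => decide (k ≤ (words.count w : Int))), d)).1
      = (PySem.List.dedup words).filter (fun w => decide (k ≤ (words.count w : Int))) := by
  intro l
  induction l with
  | nil =>
      intro p d hp _
      rw [List.append_nil] at hp
      subst hp
      rfl
  | cons w l ih =>
      intro p d hp hd
      have hstep : (if k ≤ d.getD w 0 then True else False) = (if w ∉ p ∧ k ≤ (words.count w : Int) then True else False) := by
        rw [hd w]
        by_cases hmem : w ∈ p <;> by_cases hc : k ≤ (words.count w : Int) <;> simp [hmem, hc] <;> try omega
      by_cases hcase : w ∉ p ∧ k ≤ (words.count w : Int)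
      · -- emitted: first occurrence of a qualifying word
        have hcond : k ≤ d.getD w 0 := by
          by_contra hno
          simp [hno, hcase] at hstep
        obtain ⟨hw, hc⟩ := hcase
        have hded : PySem.List.dedup (p ++ [w]) = PySem.List.dedup p ++ [w] := by
          simp only [PySem.List.dedup_eq_ofList]
          rw [PySem.Set.ofList_eq_foldl, List.foldl_append]
          rw [← PySem.Set.ofList_eq_foldl]
          simp [PySem.Set.add, PySem.Set.mem_ofList, hw]
        simp only [List.foldl_cons, if_pos hcond]
        have hacc : (PySem.List.dedup p).filter (fun w => decide (k ≤ (words.count w : Int))) ++ [w]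
            = (PySem.List.dedup (p ++ [w])).filter (fun w => decide (k ≤ (words.count w : Int))) := by
          rw [hded, List.filter_append]
          simp [hc]
        rw [hacc]
        apply ih (p ++ [w])
        · simpa using hp
        · intro w'
          by_cases he : w' = w
          · subst he
            simp [hc]
          · rw [PySem.Dict.getD_insert, if_neg he, hd w']
            simp [he]
      · -- skipped: repeat occurrence or count below k
        have hcond : ¬ k ≤ d.getD w 0 := by
          by_contra hyes
          simp [hyes, hcase] at hstep
        have hded : (PySem.List.dedup (p ++ [w])).filter (fun w => decide (k ≤ (words.count w : Int)))
            = (PySem.List.dedup p).filter (fun w => decide (k ≤ (words.count w : Int))) := by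
          by_cases hw : w ∈ p
          · congr 1
            simp only [PySem.List.dedup_eq_ofList]
            rw [PySem.Set.ofList_eq_foldl, List.foldl_append, ← PySem.Set.ofList_eq_foldl]
            simp [PySem.Set.add, PySem.Set.mem_ofList, hw]
          · have hc : ¬ k ≤ (words.count w : Int) := by tauto
            simp only [PySem.List.dedup_eq_ofList]
            rw [PySem.Set.ofList_eq_foldl, List.foldl_append, ← PySem.Set.ofList_eq_foldl]
            simp [PySem.Set.add, PySem.Set.mem_ofList, hw,
              List.filter_append, hc]
        simp only [List.foldl_cons, if_neg hcond]
        rw [← hded]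
        apply ih (p ++ [w])
        · simpa using hp
        · intro w'
          rw [hd w']
          by_cases he : w' = w
          · subst he
            by_cases hw : w' ∈ p
            · simp [hw]
            · have hc : ¬ k ≤ (words.count w' : Int) := by tauto
              simp [hw, hc]
          · simp [he]

-- A's loop when k ≤ 0: the test always passes (counts stay ≥ 0), so every occurrence is emitted.
theorem helperA_loop_nonpos (k : Int) (hk : k ≤ 0) :
    ∀ (l acc : List String) (d : PySem.Dict String Int),
      (∀ w ∈ l, 0 ≤ d.getD w 0) →
      (l.foldl
        (fun (s : List String × PySem.Dict String Int) word =>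
          if k ≤ s.2.getD word 0 then (s.1 ++ [word], s.2.insert word 0) else s)
        (acc, d)).1 = acc ++ l := by
  intro l
  induction l with
  | nil => intro acc d _; simp
  | cons w l ih =>
      intro acc d hd
      have hcond : k ≤ d.getD w 0 := le_trans hk (hd w (List.mem_cons_self))
      simp only [List.foldl_cons, if_pos hcond]
      rw [ih (acc ++ [w]) (d.insert w 0)]
      · simp
      · intro w' hw'
        rw [PySem.Dict.getD_insert]
        split
        · exact le_refl 0
        · exact hd w' (List.mem_cons_of_mem _ hw')

theorem helperA_eq_words_of_nonpos (text : String) (k : Int) (hk : k ≤ 0) :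
    helper text k = PySem.Str.split₀ text := by
  unfold helper
  rw [helperA_loop_nonpos k hk]
  · simp
  · intro w _
    rw [PySem.Dict.getD_counter]
    exact Int.natCast_nonneg _

-- ---- B-side: the run scan over the sorted list ----

theorem runFrom_ge (sw : List String) (v : String) :
    ∀ (fuel j : Nat), j ≤ runFrom sw v fuel j := by
  intro fuel
  induction fuel with
  | zero => intro j; simp [runFrom]
  | succ fuel ih =>
      intro j
      unfold runFrom
      split
      · split
        · exact le_trans (by omega) (ih (j + 1))
        · exact le_refl j
      · exact le_refl j

theorem runFrom_le_length (sw : List String) (v : String) :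
    ∀ (fuel j : Nat), j ≤ sw.length → runFrom sw v fuel j ≤ sw.length := by
  intro fuel
  induction fuel with
  | zero => intro j hj; simpa [runFrom] using hj
  | succ fuel ih =>
      intro j hj
      unfold runFrom
      split
      · split
        · exact ih (j + 1) (by omega)
        · exact hj
      · exact hj

theorem drop_runFrom (sw : List String) (v : String) :
    ∀ (fuel j : Nat), sw.length ≤ fuel + j →
      sw.drop j = List.replicate (runFrom sw v fuel j - j) v ++ sw.drop (runFrom sw v fuel j) := by
  intro fuel
  induction fuel with
  | zero =>
      intro j hf
      simp [runFrom]
  | succ fuel ih =>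
      intro j hf
      unfold runFrom
      split
      · rename_i h
        split
        · rename_i hv
          have hge : j + 1 ≤ runFrom sw v fuel (j + 1) := runFrom_ge sw v fuel (j + 1)
          have hrep : List.replicate (runFrom sw v fuel (j + 1) - j) v
              = v :: List.replicate (runFrom sw v fuel (j + 1) - (j + 1)) v := by
            have : runFrom sw v fuel (j + 1) - j = (runFrom sw v fuel (j + 1) - (j + 1)) + 1 := by omega
            rw [this, List.replicate_succ]
          rw [List.drop_eq_getElem_cons h, hv, ih (j + 1) (by omega), hrep]
          rfl
        · simp
      · simp

theorem runFrom_ne (sw : List String) (v : String) :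
    ∀ (fuel j : Nat), sw.length ≤ fuel + j →
      ∀ (h : runFrom sw v fuel j < sw.length), sw[runFrom sw v fuel j] ≠ v := by
  intro fuel
  induction fuel with
  | zero =>
      intro j hf h
      simp [runFrom] at h ⊢
      omega
  | succ fuel ih =>
      intro j hf
      unfold runFrom
      split
      · rename_i hjl
        split
        · rename_i hv
          exact ih (j + 1) (by omega)
        · rename_i hv
          intro _
          exact hv
      · rename_i hjl
        intro h
        omega

theorem runFrom_gt (sw : List String) (v : String) (fuel j : Nat)
    (hf : sw.length ≤ fuel + j) (hjl : j < sw.length) (hv : sw[j] = v) :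
    j < runFrom sw v fuel j := by
  cases fuel with
  | zero => omega
  | succ fuel =>
      unfold runFrom
      rw [dif_pos hjl, if_pos hv]
      exact lt_of_lt_of_le (Nat.lt_succ_self j) (runFrom_ge sw v fuel (j + 1))

theorem ofList_replicate (c : Nat) (hc : 0 < c) (v : String) :
    PySem.Set.ofList (List.replicate c v) = [v] := by
  induction c with
  | zero => omega
  | succ c ih =>
      rw [List.replicate_succ, PySem.Set.ofList_cons]
      cases Nat.eq_zero_or_pos c with
      | inl h => subst h; simp [PySem.Set.discard]
      | inr h => rw [ih h]; simp [PySem.Set.discard]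

-- set(first occurrences) of a constant run followed by fresh material
theorem dedup_replicate_append (c : Nat) (hc : 0 < c) (v : String) (rest : List String)
    (hv : v ∉ rest) :
    PySem.List.dedup (List.replicate c v ++ rest) = v :: PySem.List.dedup rest := by
  simp only [PySem.List.dedup_eq_ofList]
  rw [PySem.Set.ofList_append, ofList_replicate c hc v, PySem.Set.update_eq_append_filter]
  have : (PySem.Set.ofList rest).filter (fun y => !(PySem.Set.contains [v] y)) = PySem.Set.ofList rest := by
    rw [List.filter_eq_self]
    intro a ha
    have hav : a ≠ v := by
      intro h; subst h
      exact hv ((PySem.Set.mem_ofList _ _).mp ha)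
    simp [PySem.Set.contains, hav]
  rw [this]
  rfl

-- the run scan over a sorted list returns the distinct words whose total count is ≥ k
theorem runScan_eq (sw : List String) (k : Int) (hs : sw.Pairwise (· ≤ ·)) :
    ∀ (fuel i : Nat), sw.length ≤ fuel + i →
      (∀ (m m' : Nat) (hm : m < sw.length) (hmi : m < i) (hm' : m' < sw.length), i ≤ m' → sw[m] ≠ sw[m']) →
      runScan sw k fuel i
        = (PySem.List.dedup (sw.drop i)).filter (fun w => decide (k ≤ (sw.count w : Int))) := by
  have hp : ∀ (a b : Nat) (ha : a < sw.length) (hb : b < sw.length), a < b → sw[a] ≤ sw[b] :=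
    fun a b ha hb hab => List.pairwise_iff_getElem.mp hs a b ha hb hab
  intro fuel
  induction fuel with
  | zero =>
      intro i hf _
      have hdrop : sw.drop i = [] := List.drop_eq_nil_of_le (by omega)
      simp [runScan, hdrop, PySem.List.dedup_eq_ofList]
  | succ fuel ih =>
      intro i hf hinv
      by_cases h : i < sw.length
      · have hij : i < runFrom sw sw[i] sw.length i :=
          runFrom_gt sw sw[i] sw.length i (by omega) h rfl
        have hjle : runFrom sw sw[i] sw.length i ≤ sw.length :=
          runFrom_le_length sw sw[i] sw.length i (le_of_lt h)
        set v := sw[i] with hv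
        set j := runFrom sw v sw.length i with hj
        have hdrop : sw.drop i = List.replicate (j - i) v ++ sw.drop j :=
          drop_runFrom sw v sw.length i (by omega)
        have hafter : ∀ (m' : Nat) (hm' : m' < sw.length), j ≤ m' → sw[m'] ≠ v := by
          intro m' hm' hjm'
          have hjlt : j < sw.length := by omega
          have h1 : sw[j] ≠ v := runFrom_ne sw v sw.length i (by omega) hjlt
          have h2 : v ≤ sw[j] := hp i j h hjlt hij
          have h3 : v < sw[j] := lt_of_le_of_ne h2 (Ne.symm h1)
          have h4 : sw[j] ≤ sw[m'] := by
            rcases Nat.lt_or_ge j m' with hlt | hge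
            · exact hp j m' hjlt hm' hlt
            · have : j = m' := by omega
              subst this; exact le_refl _
          exact ne_of_gt (lt_of_lt_of_le h3 h4)
        have hnotmem : v ∉ sw.drop j := by
          intro hmem
          obtain ⟨n, hn, hget⟩ := List.mem_iff_getElem.mp hmem
          rw [List.getElem_drop] at hget
          have hlen : j + n < sw.length := by
            have := List.length_drop (l := sw) (i := j) ▸ hn
            omega
          exact hafter (j + n) hlen (by omega) hget
        have hnottake : v ∉ sw.take i := by
          intro hmem
          obtain ⟨n, hn, hget⟩ := List.mem_iff_getElem.mp hmem
          rw [List.getElem_take] at hget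
          have hni : n < i := by
            have := List.length_take (i := i) (l := sw) ▸ hn
            omega
          exact hinv n i (by omega) hni h (le_refl i) hget
        have hcount : (sw.count v : Int) = (j : Int) - (i : Int) := by
          have hsplit : sw = sw.take i ++ sw.drop i := (List.take_append_drop i sw).symm
          have : sw.count v = (sw.take i).count v + ((List.replicate (j - i) v).count v + (sw.drop j).count v) := by
            conv_lhs => rw [hsplit, hdrop]
            rw [List.count_append, List.count_append]
          rw [this, List.count_eq_zero.mpr hnottake, List.count_eq_zero.mpr hnotmem,
            List.count_replicate_self]
          push_cast
          omega
        have hinv' : ∀ (m m' : Nat) (hm : m < sw.length) (hmi : m < j) (hm' : m' < sw.length),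
            j ≤ m' → sw[m] ≠ sw[m'] := by
          intro m m' hm hmj hm' hjm'
          rcases Nat.lt_or_ge m i with hmi | hmi
          · exact hinv m m' hm hmi hm' (by omega)
          · have hmv : sw[m] = v := by
              have e1 : sw[m]? = (List.replicate (j - i) v ++ sw.drop j)[m - i]? := by
                rw [← hdrop, List.getElem?_drop]
                congr 1
                omega
              rw [List.getElem?_append_left (by rw [List.length_replicate]; omega),
                List.getElem?_replicate, if_pos (by omega)] at e1
              rw [List.getElem?_eq_getElem hm] at e1
              exact Option.some.inj e1
            rw [hmv]
            exact fun he => hafter m' hm' hjm' he.symm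
        have hded : PySem.List.dedup (sw.drop i) = v :: PySem.List.dedup (sw.drop j) := by
          rw [hdrop]
          exact dedup_replicate_append (j - i) (by omega) v _ hnotmem
        have hrec : runScan sw k fuel j
            = (PySem.List.dedup (sw.drop j)).filter (fun w => decide (k ≤ (sw.count w : Int))) :=
          ih j (by omega) hinv'
        show runScan sw k (fuel + 1) i = _
        rw [runScan]
        rw [dif_pos h]
        simp only [← hv, ← hj]
        rw [hded, List.filter_cons]
        by_cases hcond : k ≤ (j : Int) - (i : Int)
        · rw [if_pos hcond, hrec, if_pos]
          simp only [decide_eq_true_eq, hcount]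
          exact hcond
        · rw [if_neg hcond, hrec, if_neg]
          simp only [decide_eq_true_eq, hcount]
          exact hcond
      · have hdrop : sw.drop i = [] := List.drop_eq_nil_of_le (by omega)
        rw [runScan, dif_neg h]
        simp [hdrop, PySem.List.dedup_eq_ofList]


-- the 'first' dict of Source B maps each word to its first index
theorem firstFold_getD (l : List String) :
    ∀ (s : Int) (d : PySem.Dict String Int) (w : String) (dflt : Int),
      ((PySem.List.enumerate l s).foldl
        (fun (d : PySem.Dict String Int) p => if d.contains p.2 then d else d.insert p.2 p.1) d).getD w dflt
      = if d.contains w then d.getD w dflt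
        else match PySem.List.index? l w with
             | some j => s + (j : Int)
             | none => dflt := by
  induction l with
  | nil =>
      intro s d w dflt
      simp only [PySem.List.enumerate_nil, List.foldl_nil, PySem.List.index?_eq_idxOf?,
        List.idxOf?_nil]
      split
      · rfl
      · rename_i hc
        exact PySem.Dict.getD_of_not_contains d dflt (by simpa using hc)
  | cons x l ih =>
      intro s d w dflt
      rw [PySem.List.enumerate_cons, List.foldl_cons]
      by_cases hcx : d.contains x
      · rw [if_pos hcx, ih]
        by_cases hw : w = x
        · subst hw
          rw [if_pos hcx, if_pos hcx]
        · have hidx : PySem.List.index? (x :: l) w = (PySem.List.index? l w).map (· + 1) :=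
            PySem.List.index?_cons_of_ne l (fun h => hw (Eq.symm h))
          rw [hidx]
          split <;> rename_i hcw
          · rfl
          · cases hiw : PySem.List.index? l w with
            | none => simp
            | some jj => simp; ring
      · rw [if_neg hcx, ih]
        by_cases hw : w = x
        · subst hw
          rw [if_pos (PySem.Dict.contains_insert_self _ _ _), if_neg hcx]
          rw [PySem.Dict.getD_insert_self]
          rw [PySem.List.index?_cons_self]
          simp
        · have hcw : (d.insert x s).contains w = d.contains w := by
            rw [PySem.Dict.contains_insert]
            simp [hw]
          rw [hcw]
          have hidx : PySem.List.index? (x :: l) w = (PySem.List.index? l w).map (· + 1) :=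
            PySem.List.index?_cons_of_ne l (fun h => hw (Eq.symm h))
          rw [hidx]
          split <;> rename_i hcw2
          · exact PySem.Dict.getD_insert_of_ne d s dflt hw
          · cases hiw : PySem.List.index? l w with
            | none => simp
            | some jj => simp; ring


-- the first-occurrence list has strictly increasing first indices
theorem dedup_pairwise_index (xs : List String) :
    (PySem.List.dedup xs).Pairwise
      (fun a b => ∃ ia ib : Nat, PySem.List.index? xs a = some ia ∧
        PySem.List.index? xs b = some ib ∧ ia < ib) := by
  induction xs using List.reverseRecOn with
  | nil => simp [PySem.List.dedup]
  | append_singleton xs x ih =>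
      have hstep : ∀ (a b : String),
          (∃ ia ib : Nat, PySem.List.index? xs a = some ia ∧
            PySem.List.index? xs b = some ib ∧ ia < ib) →
          (∃ ia ib : Nat, PySem.List.index? (xs ++ [x]) a = some ia ∧
            PySem.List.index? (xs ++ [x]) b = some ib ∧ ia < ib) := by
        intro a b ⟨ia, ib, ha, hb, hlt⟩
        have hma : a ∈ xs := (PySem.List.index?_isSome_iff xs a).mp (by rw [ha]; rfl)
        have hmb : b ∈ xs := (PySem.List.index?_isSome_iff xs b).mp (by rw [hb]; rfl)
        exact ⟨ia, ib, by rw [PySem.List.index?_append_of_mem [x] hma, ha],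
          by rw [PySem.List.index?_append_of_mem [x] hmb, hb], hlt⟩
      simp only [PySem.List.dedup_eq_ofList, PySem.Set.ofList_append_singleton] at ih ⊢
      by_cases hx : x ∈ PySem.Set.ofList xs
      · rw [PySem.Set.add_of_mem hx]
        exact ih.imp (fun h => hstep _ _ h)
      · rw [PySem.Set.add_of_not_mem hx]
        rw [List.pairwise_append]
        refine ⟨ih.imp (fun h => hstep _ _ h), List.pairwise_singleton _ _, ?_⟩
        intro a ha y hy
        have hyx : y = x := List.mem_singleton.mp hy
        have hma : a ∈ xs := (PySem.Set.mem_ofList _ _).mp ha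
        have hxx : x ∉ xs := fun h => hx ((PySem.Set.mem_ofList _ _).mpr h)
        obtain ⟨ia, hia⟩ := Option.isSome_iff_exists.mp ((PySem.List.index?_isSome_iff xs a).mpr hma)
        refine ⟨ia, xs.length, by rw [PySem.List.index?_append_of_mem [x] hma, hia], ?_, ?_⟩
        · rw [hyx]
          exact PySem.List.index?_append_singleton_self xs x hxx
        · obtain ⟨pre, suf, hxs, hlen, _⟩ := (PySem.List.index?_eq_some_iff xs a ia).mp hia
          have : xs.length = pre.length + 1 + suf.length := by
            rw [hxs]; simp; omega
          omega


-- B computes the dedup-filter of the words, for every k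
theorem helperB_char (text : String) (k : Int) :
    helper_alt text k
      = (PySem.List.dedup (PySem.Str.split₀ text)).filter
          (fun w => decide (k ≤ ((PySem.Str.split₀ text).count w : Int))) := by
  show PySem.List.sorted
      (runScan (PySem.List.sorted (PySem.Str.split₀ text) (fun w => w) false) k
        (PySem.List.sorted (PySem.Str.split₀ text) (fun w => w) false).length 0)
      (fun w => ((PySem.List.enumerate (PySem.Str.split₀ text) 0).foldl
        (fun (d : PySem.Dict String Int) p => if d.contains p.2 then d else d.insert p.2 p.1)
        PySem.Dict.empty).getD w 0) false
      = _
  set words := PySem.Str.split₀ text with hwords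
  set sw := PySem.List.sorted words (fun w => w) false with hsw
  have hperm : sw.Perm words := PySem.List.sorted_perm words (fun w => w) false
  have hs : sw.Pairwise (· ≤ ·) := PySem.List.sorted_pairwise words (fun w => w)
  have hqual : runScan sw k sw.length 0
      = (PySem.List.dedup sw).filter (fun w => decide (k ≤ (sw.count w : Int))) := by
    have := runScan_eq sw k hs sw.length 0 (by omega) (by intro m m' hm hmi; omega)
    simpa using this
  have hcnt : ∀ w, sw.count w = words.count w := fun w => hperm.count_eq w
  have hqual2 : runScan sw k sw.length 0
      = (PySem.List.dedup sw).filter (fun w => decide (k ≤ (words.count w : Int))) := by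
    rw [hqual]
    apply List.filter_congr
    intro w _
    rw [hcnt w]
  rw [hqual2]
  have hkey : ∀ (w : String), w ∈ words →
      ((PySem.List.enumerate words 0).foldl
        (fun (d : PySem.Dict String Int) p => if d.contains p.2 then d else d.insert p.2 p.1)
        PySem.Dict.empty).getD w 0
      = ((PySem.List.index? words w).getD 0 : Nat) := by
    intro w hw
    rw [firstFold_getD words 0 PySem.Dict.empty w 0]
    rw [if_neg (by simp [PySem.Dict.contains_empty])]
    obtain ⟨j, hj⟩ := Option.isSome_iff_exists.mp ((PySem.List.index?_isSome_iff words w).mpr hw)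
    rw [hj]
    simp
  have hnd1 : ((PySem.List.dedup sw).filter (fun w => decide (k ≤ (words.count w : Int)))).Nodup :=
    (PySem.List.nodup_dedup sw).filter _
  have hnd2 : ((PySem.List.dedup words).filter (fun w => decide (k ≤ (words.count w : Int)))).Nodup :=
    (PySem.List.nodup_dedup words).filter _
  have hpermf : ((PySem.List.dedup words).filter (fun w => decide (k ≤ (words.count w : Int)))).Perm
      ((PySem.List.dedup sw).filter (fun w => decide (k ≤ (words.count w : Int)))) := by
    rw [List.perm_ext_iff_of_nodup hnd2 hnd1]
    intro a
    simp only [List.mem_filter, PySem.List.mem_dedup]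
    rw [hperm.mem_iff]
  have hpair : ((PySem.List.dedup words).filter (fun w => decide (k ≤ (words.count w : Int)))).Pairwise
      (fun a b => ((PySem.List.enumerate words 0).foldl
        (fun (d : PySem.Dict String Int) p => if d.contains p.2 then d else d.insert p.2 p.1)
        PySem.Dict.empty).getD a 0
        < ((PySem.List.enumerate words 0).foldl
        (fun (d : PySem.Dict String Int) p => if d.contains p.2 then d else d.insert p.2 p.1)
        PySem.Dict.empty).getD b 0) := by
    have hbase := (dedup_pairwise_index words).filter (fun w => decide (k ≤ (words.count w : Int)))
    refine hbase.imp ?_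
    rintro a b ⟨ia, ib, ha, hb, hlt⟩
    have hma : a ∈ words := (PySem.List.index?_isSome_iff words a).mp (by rw [ha]; rfl)
    have hmb : b ∈ words := (PySem.List.index?_isSome_iff words b).mp (by rw [hb]; rfl)
    rw [hkey a hma, hkey b hmb, ha, hb]
    simp only [Option.getD_some]
    exact_mod_cast hlt
  exact PySem.List.sorted_eq_of_perm_of_pairwise_lt _ _ _ hpermf hpair


theorem helperB_eq_dedup_of_nonpos (text : String) (k : Int) (hk : k ≤ 0) :
    helper_alt text k = PySem.List.dedup (PySem.Str.split₀ text) := by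
  rw [helperB_char]
  rw [List.filter_eq_self]
  intro w hw
  simp only [decide_eq_true_eq]
  have hmem : w ∈ PySem.Str.split₀ text := (PySem.List.mem_dedup _ _).mp hw
  have : 1 ≤ (PySem.Str.split₀ text).count w := List.one_le_count_iff.mpr hmem
  have : (1 : Int) ≤ ((PySem.Str.split₀ text).count w : Int) := by exact_mod_cast this
  omega

-- ===== VERDICT (by name: the statement is the Claim_ definition above) =====
theorem helper_spec : Claim_unchanged_helper := by
  intro text k _ hnd
  by_cases hk : 1 ≤ k
  · -- k ≥ 1: both sides are the dedup-filter of the words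
    show helper text k = helper_alt text k
    rw [helperB_char]
    unfold helper
    have := helperA_loop_pos k hk (PySem.Str.split₀ text) (PySem.Str.split₀ text) []
      (PySem.Dict.counter (PySem.Str.split₀ text)) (by simp)
      (by intro w; simp [PySem.Dict.getD_counter])
    simpa [PySem.List.dedup] using this
  · -- k ≤ 0: D_ fails, so the words are Nodup and both sides are the word list
    have hk0 : k ≤ 0 := by omega
    have hndp : (PySem.Str.split₀ text).Nodup := by
      unfold D_helper at hnd
      tauto
    show helper text k = helper_alt text k
    rw [helperA_eq_words_of_nonpos text k hk0, helperB_eq_dedup_of_nonpos text k hk0]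
    simp only [PySem.List.dedup_eq_ofList]
    exact (PySem.Set.ofList_eq_self_of_nodup _ hndp).symm

theorem helper_changed : Claim_changed_helper := by
  unfold Claim_changed_helper
  refine ⟨by decide, by decide, ?_, ?_, by decide⟩
  · show helper "a b a" 0 = ["a", "b", "a"]
    rw [helperA_eq_words_of_nonpos _ _ le_rfl]
    decide
  · show helper_alt "a b a" 0 = ["a", "b"]
    rw [helperB_eq_dedup_of_nonpos _ _ le_rfl]
    decide

theorem helper_tight : Claim_exact_helper := by
  intro text k _ hD hab
  obtain ⟨hk, hnd⟩ := hD
  rw [helperA_eq_words_of_nonpos text k hk, helperB_eq_dedup_of_nonpos text k hk] at hab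
  apply hnd
  rw [hab]
  simp only [PySem.List.dedup_eq_ofList]
  exact PySem.Set.nodup_ofList _
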